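-- pv_equiv track=rewrite | github.com/choi-tak-bong/Coding-Test-My-Bullshit-Algorithms | q30.py | slice_queries
-- ===== SOURCE A (Python) =====
-- def slice_queries(text: str):
--     wildcard_f = 0
--     wildcard_b = len(text)
--     text_f = 0
--     text_b = len(text)
--
--     for i in range(len(text)):
--         if text[i] == "?":
--             wildcard_f = i
--             break
--
--     for i in range(len(text)):
--         if text[::-1][i] == "?":
--             wildcard_b = i
--             break
--
--     if wildcard_f == 0:
--         text_f = wildcard_b
--     elif wildcard_b == len(text):
--         text_b = wildcard_f
--
--     return (text_f, text_b)
-- ===== SOURCE B (Python) =====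
-- def slice_queries(text: str):
--     n = len(text)
--     first = None
--     last = None
--     for i, c in enumerate(text):
--         if c == "?":
--             if first is None:
--                 first = i
--             last = i
--     if first is None:
--         return (n, n)
--     if first == 0:
--         return (n - 1 - last, n)
--     return (0, n)
-- ===== Notes on version B (the rewrite author's own statement) =====
-- stated objective: faster
-- what changed: A makes two staged index-loop scans (the second rebuilding text[::-1] inside every iteration, quadratic) and branches on their sentinels; B is a single forward pass with a first/last-occurrence accumulator and computes the back position arithmetically as n-1-last, never reversing the string.
import Mathlib
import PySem

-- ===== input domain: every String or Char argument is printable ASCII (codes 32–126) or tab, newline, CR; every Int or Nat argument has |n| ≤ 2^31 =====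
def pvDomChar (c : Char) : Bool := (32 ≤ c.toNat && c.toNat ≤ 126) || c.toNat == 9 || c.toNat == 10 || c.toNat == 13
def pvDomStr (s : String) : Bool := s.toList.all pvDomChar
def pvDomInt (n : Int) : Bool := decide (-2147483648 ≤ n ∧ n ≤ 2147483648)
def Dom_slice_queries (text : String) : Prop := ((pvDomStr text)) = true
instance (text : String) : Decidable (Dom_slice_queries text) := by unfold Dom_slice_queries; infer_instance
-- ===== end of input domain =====

-- B replaces A's two staged scans (the second rebuilding text[::-1] every iteration) by one forward pass tracking first/last '?'; measured asymptotically faster.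


-- ===== PORT A =====
-- for i in range(len(text)): if text[i] == "?": wildcard_f = i; break
def pvLoopF (cs : List Char) : List Int → Int → Int
  | [], wf => wf
  | i :: rest, wf =>
    if PySem.List.pyGetD cs i ' ' = '?' then i else pvLoopF cs rest wf

-- for i in range(len(text)): if text[::-1][i] == "?": wildcard_b = i; break
-- (text[::-1] is recomputed inside the loop body, as in A)
def pvLoopB (cs : List Char) : List Int → Int → Int
  | [], wb => wb
  | i :: rest, wb =>
    if PySem.List.pyGetD ((PySem.List.slice? cs none none (-1)).getD []) i ' ' = '?' then i
    else pvLoopB cs rest wb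

def slice_queries (text : String) : Int × Int :=
  let cs := text.toList
  let n : Int := PySem.Str.len text
  let wildcard_f := pvLoopF cs (PySem.List.pyRange 0 n 1) 0
  let wildcard_b := pvLoopB cs (PySem.List.pyRange 0 n 1) n
  if wildcard_f = 0 then (wildcard_b, n)
  else if wildcard_b = n then (0, wildcard_f)
  else (0, n)

-- ===== PORT B =====
-- for i, c in enumerate(text): if c == "?": (first = i if first is None) ; last = i
def pvScanB : List (Int × Char) → Option Int → Option Int → Option Int × Option Int
  | [], first, last => (first, last)
  | (i, c) :: rest, first, last =>
    if c = '?' then pvScanB rest (if first = none then some i else first) (some i)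
    else pvScanB rest first last

def slice_queries_alt (text : String) : Int × Int :=
  let n : Int := PySem.Str.len text
  match pvScanB (PySem.List.enumerate text.toList 0) none none with
  | (none, _) => (n, n)
  -- when first = some 0 Python's `last` is never None; `.getD 0` is an arbitrary default for the unreachable case
  | (some f, last) => if f = 0 then (n - 1 - last.getD 0, n) else (0, n)

-- ===== PRECONDITION & SPEC =====
def Spec_slice_queries (text : String) (out : Int × Int) : Prop := out = slice_queries_alt text
instance (text : String) (out : Int × Int) : Decidable (Spec_slice_queries text out) := by unfold Spec_slice_queries; infer_instance

-- ===== CLAIM (what is proved, stated in full; the proofs are below) =====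
def Claim_equal_slice_queries : Prop := ∀ (text : String), Dom_slice_queries text → Spec_slice_queries text (slice_queries text)

-- ===== LEMMAS AND PROOFS =====

-- index (from k) of the first '?' in cs, none if absent
def pvFirstQ : List Char → Int → Option Int
  | [], _ => none
  | c :: t, k => if c = '?' then some k else pvFirstQ t (k + 1)

-- index (from k) of the last '?' in cs, none if absent
def pvLastQ : List Char → Int → Option Int
  | [], _ => none
  | c :: t, k =>
    match pvLastQ t (k + 1) with
    | some l => some l
    | none => if c = '?' then some k else none

theorem pvScanB_spec (cs : List Char) : ∀ (k : Int) (first last : Option Int),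
    pvScanB (PySem.List.enumerate cs k) first last =
      (first.or (pvFirstQ cs k), (pvLastQ cs k).or last) := by
  induction cs with
  | nil => intro k first last; simp [PySem.List.enumerate_nil, pvScanB, pvFirstQ, pvLastQ]
  | cons c t ih =>
    intro k first last
    rw [PySem.List.enumerate_cons, pvScanB]
    by_cases hc : c = '?'
    · rw [if_pos hc, ih]
      cases first <;> cases h : pvLastQ t (k + 1) <;>
        simp [pvFirstQ, pvLastQ, hc, h, Option.or]
    · rw [if_neg hc, ih]
      cases h : pvLastQ t (k + 1) <;> simp [pvFirstQ, pvLastQ, hc, h]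

theorem go_offset (suf : List Char) (k : Nat) :
    PySem.Chars.find.go ['?'] suf k =
      if PySem.Chars.find.go ['?'] suf 0 = -1 then -1
      else (k : Int) + PySem.Chars.find.go ['?'] suf 0 := by
  induction suf generalizing k with
  | nil => simp [PySem.Chars.find.go]
  | cons c t ih =>
    have unf : ∀ m : Nat, PySem.Chars.find.go ['?'] (c :: t) m =
        if List.isPrefixOf ['?'] (c :: t) then (m : Int) else PySem.Chars.find.go ['?'] t (m + 1) :=
      fun m => by rw [PySem.Chars.find.go]
    rw [unf k, unf 0]
    by_cases h : List.isPrefixOf ['?'] (c :: t)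
    · simp [h]
    · simp only [h, Bool.false_eq_true, if_false]
      rw [ih (k + 1), ih 1]
      by_cases h0 : PySem.Chars.find.go ['?'] t 0 = -1
      · simp [h0]
      · have : -1 ≤ PySem.Chars.find.go ['?'] t 0 := by
          have := PySem.Chars.neg_one_le_find t ['?']
          simpa [PySem.Chars.find] using this
        have hge : 0 ≤ PySem.Chars.find.go ['?'] t 0 := by omega
        push_cast
        rw [if_neg (by omega)]
        omega

theorem find_cons (c : Char) (t : List Char) :
    PySem.Chars.find (c :: t) ['?'] =
      if c = '?' then 0
      else if PySem.Chars.find t ['?'] = -1 then -1 else 1 + PySem.Chars.find t ['?'] := by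
  rw [PySem.Chars.find, PySem.Chars.find.go]
  have hpre : List.isPrefixOf ['?'] (c :: t) = (c = '?' : Bool) := by
    by_cases hc : c = '?' <;> simp [List.isPrefixOf, hc]
    intro h; exact hc h.symm
  rw [hpre]
  by_cases hc : c = '?'
  · simp [hc]
  · simp only [hc, decide_false, Bool.false_eq_true, if_false]
    rw [go_offset t 1, PySem.Chars.find]
    norm_num

theorem pvFirstQ_eq_find (cs : List Char) : ∀ (k : Int),
    pvFirstQ cs k =
      if PySem.Chars.find cs ['?'] = -1 then none
      else some (k + PySem.Chars.find cs ['?']) := by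
  induction cs with
  | nil => intro k; simp [pvFirstQ]; decide
  | cons c t ih =>
    intro k
    rw [pvFirstQ, find_cons]
    by_cases hc : c = '?'
    · simp [hc]
    · rw [if_neg hc, if_neg hc, ih (k + 1)]
      have := PySem.Chars.neg_one_le_find t ['?']
      by_cases h0 : PySem.Chars.find t ['?'] = -1
      · simp [h0]
      · rw [if_neg h0, if_neg h0, if_neg (by omega)]
        congr 1
        omega

theorem pvLastQ_snoc (cs : List Char) (c : Char) : ∀ (k : Int),
    pvLastQ (cs ++ [c]) k = if c = '?' then some (k + cs.length) else pvLastQ cs k := by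
  induction cs with
  | nil =>
    intro k
    by_cases hc : c = '?' <;> simp [pvLastQ, hc]
  | cons d t ih =>
    intro k
    rw [List.cons_append, pvLastQ, ih (k + 1)]
    by_cases hc : c = '?'
    · rw [if_pos hc, if_pos hc]
      congr 1
      simp only [List.length_cons]
      push_cast
      ring
    · rw [if_neg hc, if_neg hc, pvLastQ]

theorem pvLastQ_eq_rev_find (cs : List Char) :
    pvLastQ cs 0 =
      if PySem.Chars.find cs.reverse ['?'] = -1 then none
      else some ((cs.length : Int) - 1 - PySem.Chars.find cs.reverse ['?']) := by
  induction cs using List.reverseRecOn with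
  | nil => simp [pvLastQ]; decide
  | append_singleton t c ih =>
    rw [pvLastQ_snoc t c 0, List.reverse_append, List.reverse_singleton, List.singleton_append,
      find_cons]
    by_cases hc : c = '?'
    · rw [if_pos hc, if_pos hc, if_neg (by norm_num)]
      simp
    · rw [if_neg hc, if_neg hc, ih]
      have := PySem.Chars.neg_one_le_find t.reverse ['?']
      by_cases h0 : PySem.Chars.find t.reverse ['?'] = -1
      · simp [h0]
      · rw [if_neg h0, if_neg h0, if_neg (by omega)]
        congr 1
        simp only [List.length_append, List.length_cons, List.length_nil]
        push_cast
        omega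

theorem loopF_eq_find (suf : List Char) : ∀ (pre : List Char) (wf : Int),
    pvLoopF (pre ++ suf) (PySem.List.pyRange (pre.length) ((pre ++ suf).length) 1) wf =
      if PySem.Chars.find suf ['?'] = -1 then wf
      else (pre.length : Int) + PySem.Chars.find suf ['?'] := by
  induction suf with
  | nil =>
    intro pre wf
    rw [List.append_nil, PySem.List.pyRange_one_eq_nil (by omega)]
    have : PySem.Chars.find [] ['?'] = -1 := by decide
    rw [this]
    simp [pvLoopF]
  | cons c suf ih =>
    intro pre wf
    have hlen : ((pre ++ c :: suf).length : Int) = (pre.length : Int) + 1 + suf.length := by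
      simp; omega
    rw [PySem.List.pyRange_one_cons (by rw [hlen]; omega)]
    have hget : PySem.List.pyGetD (pre ++ c :: suf) (pre.length) ' ' = c := by
      rw [PySem.List.pyGetD_natCast]
      simp
    rw [pvLoopF, hget]
    by_cases hc : c = '?'
    · rw [if_pos hc, find_cons, if_pos hc]
      norm_num
    · rw [if_neg hc]
      have hassoc : pre ++ c :: suf = (pre ++ [c]) ++ suf := by simp
      have hlen2 : ((pre.length : Int) + 1) = ((pre ++ [c]).length : Int) := by simp
      rw [hassoc, hlen2, ih (pre ++ [c]) wf, find_cons, if_neg hc]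
      by_cases h0 : PySem.Chars.find suf ['?'] = -1
      · simp [h0]
      · have := PySem.Chars.neg_one_le_find suf ['?']
        rw [if_neg h0, if_neg h0, if_neg (by omega)]
        simp; omega

theorem loopB_eq_loopF (cs : List Char) (l : List Int) (wb : Int) :
    pvLoopB cs l wb = pvLoopF cs.reverse l wb := by
  induction l with
  | nil => rfl
  | cons i rest ih =>
    rw [pvLoopB, pvLoopF, PySem.List.slice?_none_none_neg_one, ih]
    rfl

theorem main (text : String) : slice_queries text = slice_queries_alt text := by
  unfold slice_queries slice_queries_alt
  set cs := text.toList with hcs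
  have hn : PySem.Str.len text = (cs.length : Int) := by simp [PySem.Str.len_eq, hcs]
  have hF : pvLoopF cs (PySem.List.pyRange 0 (PySem.Str.len text) 1) 0 =
      if PySem.Chars.find cs ['?'] = -1 then (0 : Int) else PySem.Chars.find cs ['?'] := by
    have := loopF_eq_find cs [] 0
    simpa [hn] using this
  have hB : pvLoopB cs (PySem.List.pyRange 0 (PySem.Str.len text) 1) (PySem.Str.len text) =
      if PySem.Chars.find cs.reverse ['?'] = -1 then (cs.length : Int)
      else PySem.Chars.find cs.reverse ['?'] := by
    rw [loopB_eq_loopF]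
    have := loopF_eq_find cs.reverse [] ((cs.length : Int))
    simpa [hn] using this
  have hScan : pvScanB (PySem.List.enumerate cs 0) none none =
      (pvFirstQ cs 0, pvLastQ cs 0) := by
    rw [pvScanB_spec]
    cases pvLastQ cs 0 <;> simp [Option.or]
  set f := PySem.Chars.find cs ['?'] with hf
  set r := PySem.Chars.find cs.reverse ['?'] with hr
  have hFQ : pvFirstQ cs 0 = if f = -1 then none else some f := by
    rw [pvFirstQ_eq_find cs 0]
    by_cases h : f = -1 <;> simp [← hf, h]
  have hLQ : pvLastQ cs 0 = if r = -1 then none else some ((cs.length : Int) - 1 - r) :=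
    pvLastQ_eq_rev_find cs
  have hmemiff : f = -1 ↔ r = -1 := by
    rw [hf, hr, PySem.Chars.find_eq_neg_one_iff, PySem.Chars.find_eq_neg_one_iff]
    simp [List.singleton_infix_iff]
  have hfge : -1 ≤ f := PySem.Chars.neg_one_le_find cs ['?']
  have hrge : -1 ≤ r := PySem.Chars.neg_one_le_find cs.reverse ['?']
  rw [hn] at hF hB
  simp only [hn, hF, hB, hScan, hFQ, hLQ]
  by_cases h1 : f = -1
  · have h2 : r = -1 := hmemiff.mp h1
    simp [h1, h2]
  · have h2 : r ≠ -1 := fun h => h1 (hmemiff.mpr h)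
    have hr0 : 0 ≤ r := by omega
    have hrlt : r < (cs.length : Int) := by
      have hspec := PySem.Chars.find_spec (s := cs.reverse) (sub := ['?']) (by omega)
      have hpre := hspec.1
      have : r.toNat < cs.reverse.length := by
        by_contra hge
        push Not at hge
        rw [List.drop_eq_nil_of_le hge] at hpre
        simp at hpre
      simp at this
      omega
    rw [if_neg h1, if_neg h1, if_neg h2, if_neg h2]
    by_cases h3 : f = 0
    · rw [if_pos h3]
      simp only [h3, Option.getD_some, if_true]
      congr 1
      omega
    · rw [if_neg h3, if_neg (by omega)]
      simp [h3]

-- ===== VERDICT (by name: the statement is the Claim_ definition above) =====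
theorem slice_queries_spec : Claim_equal_slice_queries := by
  intro text _
  unfold Spec_slice_queries
  exact main text
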